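-- pv_equiv track=rewrite | github.com/VitamintK/AlgorithmProblems | hackerrank/asian_pacific_american_heritage_month_2021/d.py | dfs
-- ===== SOURCE A (Python) =====
-- def dfs(start, edges, visitNodes, visited):
--     tot_dist = 0
--     visited.add(start)
--     for v in edges[start]:
--         if v not in visited:
--             relevant_distance = dfs(v, edges, visitNodes, visited)
--             if relevant_distance > 0 or v in visitNodes:
--                 tot_dist += relevant_distance + 1
--     return tot_dist
-- ===== SOURCE B (Python) =====
-- def dfs(start, edges, visitNodes, visited):
--     # Iterative DFS with an explicit stack of frames [node, neighbors, next-index, subtotal];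
--     # mutates `visited` in place exactly as the recursive original does.
--     visited.add(start)
--     stack = [[start, edges[start], 0, 0]]
--     while True:
--         frame = stack[-1]
--         v, nbrs, i, tot = frame
--         if i < len(nbrs):
--             frame[2] = i + 1
--             w = nbrs[i]
--             if w not in visited:
--                 visited.add(w)
--                 stack.append([w, edges[w], 0, 0])
--         else:
--             stack.pop()
--             if not stack:
--                 return tot
--             if tot > 0 or v in visitNodes:
--                 stack[-1][3] += tot + 1
-- ===== Notes on version B (the rewrite author's own statement) =====
-- stated objective: alternative
-- what changed: Replaces the recursive DFS (implicit call stack, per-call subtotal) by an iterative while-loop over an explicit stack of frames (node, neighbour list, index, subtotal), finishing a frame by folding its subtotal into its parent frame.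
import Mathlib
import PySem

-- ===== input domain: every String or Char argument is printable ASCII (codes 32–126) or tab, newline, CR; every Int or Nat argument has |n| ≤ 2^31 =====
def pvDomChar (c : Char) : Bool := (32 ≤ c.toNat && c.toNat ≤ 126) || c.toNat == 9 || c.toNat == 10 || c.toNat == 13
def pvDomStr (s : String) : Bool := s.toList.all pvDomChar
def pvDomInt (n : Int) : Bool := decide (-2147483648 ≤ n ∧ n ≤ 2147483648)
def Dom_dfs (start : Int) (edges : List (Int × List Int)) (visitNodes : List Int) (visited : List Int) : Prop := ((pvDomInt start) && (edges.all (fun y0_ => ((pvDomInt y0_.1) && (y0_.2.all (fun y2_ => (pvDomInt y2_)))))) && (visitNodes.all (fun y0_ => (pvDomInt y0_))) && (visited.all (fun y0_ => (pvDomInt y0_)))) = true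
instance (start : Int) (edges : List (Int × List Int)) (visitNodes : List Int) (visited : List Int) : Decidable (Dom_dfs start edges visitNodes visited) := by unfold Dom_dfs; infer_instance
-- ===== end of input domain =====

-- B replaces the recursive DFS by an iterative DFS over an explicit stack of frames (same visited-marking
-- order, same subtotal updates); equivalence is about the RETURN value — both Pythons also mutate `visited`
-- in place identically.

-- ===== PORT A =====

-- edges[k] on the association list (dict): first match, none = KeyError
def pvLookup (edges : List (Int × List Int)) (k : Int) : Option (List Int) :=
  (edges.find? (fun p => p.1 == k)).map (fun p => p.2)

-- measure helper for termination: dict keys not yet visited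
def pvFree (edges : List (Int × List Int)) (visited : List Int) : Nat :=
  ((edges.map Prod.fst).toFinset \ visited.toFinset).card

theorem pvFree_mono (edges : List (Int × List Int)) {v1 v2 : List Int}
    (h : ∀ x ∈ v1, x ∈ v2) : pvFree edges v2 ≤ pvFree edges v1 := by
  apply Finset.card_le_card
  intro x hx
  simp only [Finset.mem_sdiff, List.mem_toFinset] at *
  exact ⟨hx.1, fun hm => hx.2 (h x hm)⟩

theorem pvFree_lt (edges : List (Int × List Int)) {v : Int} {visited : List Int}
    (hk : v ∈ edges.map Prod.fst) (hv : v ∉ visited) :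
    pvFree edges (PySem.Set.add visited v) < pvFree edges visited := by
  apply Finset.card_lt_card
  constructor
  · intro x hx
    simp only [Finset.mem_sdiff, List.mem_toFinset, PySem.Set.mem_add] at *
    exact ⟨hx.1, fun hm => hx.2 (Or.inl hm)⟩
  · intro hsub
    have := hsub (by simp only [Finset.mem_sdiff, List.mem_toFinset]; exact ⟨hk, hv⟩)
    simp [PySem.Set.mem_add] at this

theorem pvLookup_mem_keys {edges : List (Int × List Int)} {k : Int} {l : List Int}
    (h : pvLookup edges k = some l) : k ∈ edges.map Prod.fst := by
  unfold pvLookup at h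
  cases hf : edges.find? (fun p => p.1 == k) with
  | none => simp [hf] at h
  | some p =>
    have hm := List.mem_of_find?_eq_some hf
    have he := List.find?_some hf
    simp only [beq_iff_eq] at he
    subst he
    exact List.mem_map_of_mem hm

-- the recursive body of A: the loop over `nbrs` threading (visited, tot); returns
-- (none, _) on KeyError; the subtype carries "visited only grows" (needed for termination)
def goA (edges : List (Int × List Int)) (visitNodes : List Int) :
    (nbrs : List Int) → (visited : List Int) → (tot : Int) →
    {r : Option Int × List Int // ∀ x ∈ visited, x ∈ r.2}
  | [], visited, tot => ⟨(some tot, visited), fun _ hx => hx⟩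
  | v :: rest, visited, tot =>
    if hv : PySem.Set.contains visited v then
      -- v already visited: skip
      goA edges visitNodes rest visited tot
    else
      match hl : pvLookup edges v with
      | none => ⟨(none, visited), fun _ hx => hx⟩  -- edges[v] raises KeyError
      | some vnbrs =>
        -- relevant_distance = dfs(v, …): mark v visited and recurse on its neighbours
        let r := goA edges visitNodes vnbrs (PySem.Set.add visited v) 0
        have hr : ∀ x ∈ visited, x ∈ r.val.2 := fun x hx =>
          r.property x (by rw [PySem.Set.mem_add]; exact Or.inl hx)
        match hres : r.val.1 with
        | none => ⟨(none, r.val.2), hr⟩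
        | some rd =>
          let tot' := if rd > 0 || visitNodes.contains v then tot + rd + 1 else tot
          let s := goA edges visitNodes rest r.val.2 tot'
          ⟨s.val, fun x hx => s.property x (hr x hx)⟩
  termination_by nbrs visited _ => (pvFree edges visited, nbrs.length)
  decreasing_by
  · exact Prod.Lex.right _ (Nat.lt_succ_self _)
  · exact Prod.Lex.left _ _ (pvFree_lt edges (pvLookup_mem_keys hl)
      (by simpa [PySem.Set.contains_iff] using hv))
  · rcases lt_or_eq_of_le (pvFree_mono edges hr) with h | h
    · exact Prod.Lex.left _ _ h
    · rw [h]; exact Prod.Lex.right _ (Nat.lt_succ_self _)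

-- A: visited.add(start); loop over edges[start]; return tot_dist (0 stands for the excluded KeyError)
def dfs (start : Int) (edges : List (Int × List Int)) (visitNodes : List Int) (visited : List Int) : Int :=
  let visited1 := PySem.Set.add visited start
  match pvLookup edges start with
  | none => 0
  | some nbrs => ((goA edges visitNodes nbrs visited1 0).val.1).getD 0

-- ===== PORT B =====

-- B's while-loop: stack of frames (node, remaining neighbours, subtotal); Python's fixed
-- list + advancing index is ported as the remaining suffix; none = KeyError
def runB (edges : List (Int × List Int)) (visitNodes : List Int) :
    (stack : List (Int × List Int × Int)) → (visited : List Int) → Option Int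
  | [], _ => none
  | (v, w :: rest, tot) :: K, visited =>
    if hw : PySem.Set.contains visited w then
      runB edges visitNodes ((v, rest, tot) :: K) visited
    else
      match hlw : pvLookup edges w with
      | none => none
      | some wn => runB edges visitNodes ((w, wn, 0) :: (v, rest, tot) :: K) (PySem.Set.add visited w)
  | (v, [], tot) :: K, visited =>
    match K with
    | [] => some tot
    | (u, remu, totu) :: K' =>
      runB edges visitNodes
        ((u, remu, if tot > 0 || visitNodes.contains v then totu + tot + 1 else totu) :: K') visited
  termination_by stack visited => (pvFree edges visited, (stack.map (fun f => f.2.1.length + 1)).sum)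
  decreasing_by
  · exact Prod.Lex.right _ (by simp only [List.map_cons, List.sum_cons, List.length_cons]; omega)
  · exact Prod.Lex.left _ _ (pvFree_lt edges (pvLookup_mem_keys hlw)
      (by simpa [PySem.Set.contains_iff] using hw))
  · exact Prod.Lex.right _ (by simp only [List.map_cons, List.sum_cons, List.length_cons]; omega)

def dfs_alt (start : Int) (edges : List (Int × List Int)) (visitNodes : List Int) (visited : List Int) : Int :=
  let visited1 := PySem.Set.add visited start
  match pvLookup edges start with
  | none => 0
  | some nbrs => (runB edges visitNodes [(start, nbrs, 0)] visited1).getD 0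

-- ===== PRECONDITION & SPEC =====

-- one closure pass: to the current set S add every neighbour (under first-match adjacency) of a
-- member of S that is neither pre-visited nor `start` nor already in S
def pvStep (edges : List (Int × List Int)) (visited : List Int) (start : Int) (S : List Int) : List Int :=
  S.foldl (fun acc v =>
    match pvLookup edges v with
    | none => acc
    | some adj => adj.foldl (fun acc2 w =>
        if w ∈ visited ∨ w = start ∨ w ∈ acc2 then acc2 else acc2 ++ [w]) acc) S

-- nodes reachable from `start` along edges avoiding the pre-visited set (closure is reached well
-- within `total adjacency entries + 1` passes)
def pvReach (edges : List (Int × List Int)) (visited : List Int) (start : Int) : List Int :=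
  (List.range (edges.foldl (fun n p => n + p.2.length) 0 + 1)).foldl
    (fun S _ => pvStep edges visited start S) [start]

-- Pre_ excludes EXACTLY the inputs on which A raises KeyError: some node of the input graph that is
-- reachable from `start` without passing through a pre-visited node has no adjacency entry (graph
-- reachability, a property of the input; A returns a value on every input Pre_ admits).
def Pre_dfs (start : Int) (edges : List (Int × List Int)) (visitNodes : List Int) (visited : List Int) : Prop :=
  ∀ v ∈ pvReach edges visited start, v ∈ edges.map Prod.fst

instance (start : Int) (edges : List (Int × List Int)) (visitNodes : List Int) (visited : List Int) : Decidable (Pre_dfs start edges visitNodes visited) := by unfold Pre_dfs; infer_instance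

def pvWitness_dfs : Int × (List (Int × List Int)) × List Int × List Int :=
  (0, [(0, [1, 2]), (1, [2]), (2, [])], [2], [])

def Spec_dfs (start : Int) (edges : List (Int × List Int)) (visitNodes : List Int) (visited : List Int) (out : Int) : Prop := out = dfs_alt start edges visitNodes visited
instance (start : Int) (edges : List (Int × List Int)) (visitNodes : List Int) (visited : List Int) (out : Int) : Decidable (Spec_dfs start edges visitNodes visited out) := by unfold Spec_dfs; infer_instance

-- ===== CLAIM (what is proved, stated in full; the proofs are below) =====
def Claim_equal_dfs : Prop := ∀ (start : Int) (edges : List (Int × List Int)) (visitNodes : List Int) (visited : List Int), Dom_dfs start edges visitNodes visited → Pre_dfs start edges visitNodes visited → Spec_dfs start edges visitNodes visited (dfs start edges visitNodes visited)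

-- ===== LEMMAS AND PROOFS =====

-- unfolding equations for the two loops, then: the stack machine run from a frame (v, nbrs, tot) :: K
-- equals A's loop body goA on (nbrs, visited, tot) followed by runB's pop step
theorem runB_done (edges : List (Int × List Int)) (vN : List Int) (v tot : Int) (visited : List Int) :
    runB edges vN [(v, [], tot)] visited = some tot := by
  simp [runB]

theorem runB_pop (edges : List (Int × List Int)) (vN : List Int) (v tot u : Int) (remu : List Int)
    (totu : Int) (K : List (Int × List Int × Int)) (visited : List Int) :
    runB edges vN ((v, [], tot) :: (u, remu, totu) :: K) visited =
      runB edges vN ((u, remu, if tot > 0 || vN.contains v then totu + tot + 1 else totu) :: K) visited := by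
  simp [runB]

theorem runB_skip (edges : List (Int × List Int)) (vN : List Int) {w : Int} {visited : List Int}
    (h : w ∈ visited) (v : Int) (rest : List Int) (tot : Int) (K : List (Int × List Int × Int)) :
    runB edges vN ((v, w :: rest, tot) :: K) visited = runB edges vN ((v, rest, tot) :: K) visited := by
  simp [runB, h]

theorem runB_keyerr (edges : List (Int × List Int)) (vN : List Int) {w : Int} {visited : List Int}
    (h : w ∉ visited) (hl : pvLookup edges w = none) (v : Int) (rest : List Int) (tot : Int)
    (K : List (Int × List Int × Int)) :
    runB edges vN ((v, w :: rest, tot) :: K) visited = none := by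
  have hc : ¬ PySem.Set.contains visited w = true := by simp [h]
  simp only [runB]
  rw [dif_neg hc, hl]

theorem runB_push (edges : List (Int × List Int)) (vN : List Int) {w : Int} {visited : List Int}
    {wn : List Int} (h : w ∉ visited) (hl : pvLookup edges w = some wn) (v : Int) (rest : List Int)
    (tot : Int) (K : List (Int × List Int × Int)) :
    runB edges vN ((v, w :: rest, tot) :: K) visited =
      runB edges vN ((w, wn, 0) :: (v, rest, tot) :: K) (PySem.Set.add visited w) := by
  have hc : ¬ PySem.Set.contains visited w = true := by simp [h]
  simp only [runB]
  rw [dif_neg hc, hl]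

theorem goA_nil (edges : List (Int × List Int)) (vN : List Int) (visited : List Int) (tot : Int) :
    (goA edges vN [] visited tot).val = (some tot, visited) := by
  simp [goA]

theorem goA_skip (edges : List (Int × List Int)) (vN : List Int) {w : Int} {visited : List Int}
    (h : w ∈ visited) (rest : List Int) (tot : Int) :
    goA edges vN (w :: rest) visited tot = goA edges vN rest visited tot := by
  simp [goA, h]

theorem goA_keyerr (edges : List (Int × List Int)) (vN : List Int) {w : Int} {visited : List Int}
    (h : w ∉ visited) (hl : pvLookup edges w = none) (rest : List Int) (tot : Int) :
    (goA edges vN (w :: rest) visited tot).val = (none, visited) := by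
  have hc : ¬ PySem.Set.contains visited w = true := by simp [h]
  simp only [goA]
  rw [dif_neg hc, hl]

theorem goA_child_none (edges : List (Int × List Int)) (vN : List Int) {w : Int} {visited : List Int}
    {wn : List Int} (h : w ∉ visited) (hl : pvLookup edges w = some wn)
    (hres : (goA edges vN wn (PySem.Set.add visited w) 0).val.1 = none) (rest : List Int) (tot : Int) :
    (goA edges vN (w :: rest) visited tot).val =
      (none, (goA edges vN wn (PySem.Set.add visited w) 0).val.2) := by
  have hc : ¬ PySem.Set.contains visited w = true := by simp [h]
  simp only [goA]
  rw [dif_neg hc]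
  split
  next heq => rw [hl] at heq; cases heq
  next vnbrs heq =>
    rw [hl] at heq; injection heq with heq; subst heq
    split
    next h2 => rfl
    next rd' h2 => rw [hres] at h2; cases h2

theorem goA_child_some (edges : List (Int × List Int)) (vN : List Int) {w : Int} {visited : List Int}
    {wn : List Int} {rd : Int} (h : w ∉ visited) (hl : pvLookup edges w = some wn)
    (hres : (goA edges vN wn (PySem.Set.add visited w) 0).val.1 = some rd) (rest : List Int) (tot : Int) :
    (goA edges vN (w :: rest) visited tot).val =
      (goA edges vN rest (goA edges vN wn (PySem.Set.add visited w) 0).val.2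
        (if rd > 0 || vN.contains w then tot + rd + 1 else tot)).val := by
  have hc : ¬ PySem.Set.contains visited w = true := by simp [h]
  simp only [goA]
  rw [dif_neg hc]
  split
  next heq => rw [hl] at heq; cases heq
  next vnbrs heq =>
    rw [hl] at heq; injection heq with heq; subst heq
    split
    next h2 => rw [hres] at h2; cases h2
    next rd' h2 =>
      rw [hres] at h2; injection h2 with h2; subst h2
      rfl
theorem runB_eq_goA (edges : List (Int × List Int)) (visitNodes : List Int) :
    ∀ (nbrs visited : List Int) (tot : Int) (v : Int) (K : List (Int × List Int × Int)),
      runB edges visitNodes ((v, nbrs, tot) :: K) visited =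
        match (goA edges visitNodes nbrs visited tot).val with
        | (none, _) => none
        | (some t, vis') =>
          match K with
          | [] => some t
          | (u, remu, totu) :: K' =>
            runB edges visitNodes
              ((u, remu, if t > 0 || visitNodes.contains v then totu + t + 1 else totu) :: K') vis' := by
  intro nbrs visited tot
  induction nbrs, visited, tot using goA.induct edges visitNodes with
  | case1 visited tot =>
    intro v K
    rw [goA_nil]
    cases K with
    | nil => exact runB_done edges visitNodes v tot visited
    | cons f K' =>
      rcases f with ⟨u, remu, totu⟩
      exact runB_pop edges visitNodes v tot u remu totu K' visited
  | case2 w rest visited tot h ih =>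
    intro v K
    have hw : w ∈ visited := by rwa [PySem.Set.contains_iff] at h
    rw [runB_skip edges visitNodes hw, goA_skip edges visitNodes hw]
    exact ih v K
  | case3 w rest visited tot h hl =>
    intro v K
    have hw : w ∉ visited := by rw [← PySem.Set.contains_iff]; exact h
    rw [runB_keyerr edges visitNodes hw hl, goA_keyerr edges visitNodes hw hl]
  | case4 w rest visited tot h wn hl r hmono hres ihc =>
    intro v K
    have hw : w ∉ visited := by rw [← PySem.Set.contains_iff]; exact h
    rw [runB_push edges visitNodes hw hl, goA_child_none edges visitNodes hw hl hres]
    rw [ihc w ((v, rest, tot) :: K)]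
    rcases hval : (goA edges visitNodes wn (PySem.Set.add visited w) 0).val with ⟨ro, vis2⟩
    rw [hval] at hres
    simp only at hres
    subst hres
    rfl
  | case5 w rest visited tot h wn hl r hmono rd hres tot2 ihc ihs ihs2 =>
    intro v K
    have hw : w ∉ visited := by rw [← PySem.Set.contains_iff]; exact h
    rw [runB_push edges visitNodes hw hl, goA_child_some edges visitNodes hw hl hres]
    rw [ihc w ((v, rest, tot) :: K)]
    rcases hval : (goA edges visitNodes wn (PySem.Set.add visited w) 0).val with ⟨ro, vis2⟩
    rw [hval] at hres
    simp only at hres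
    subst hres
    simp only
    rw [hval] at ihs2
    simp only [dite_eq_ite] at ihs2
    exact ihs2 v K

theorem dfs_eq_alt (start : Int) (edges : List (Int × List Int)) (visitNodes : List Int) (visited : List Int) :
    dfs start edges visitNodes visited = dfs_alt start edges visitNodes visited := by
  unfold dfs dfs_alt
  cases hl : pvLookup edges start with
  | none => rfl
  | some nbrs =>
    simp only
    rw [runB_eq_goA]
    rcases hres : (goA edges visitNodes nbrs (PySem.Set.add visited start) 0).val with ⟨ro, vis'⟩
    cases ro <;> simp

-- ===== VERDICT (by name: the statement is the Claim_ definition above) =====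
theorem dfs_spec : Claim_equal_dfs := by
  intro start edges visitNodes visited _ _
  unfold Spec_dfs
  exact dfs_eq_alt start edges visitNodes visited
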